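-- pv_equiv track=rewrite | github.com/moonjs0113/CodingTest | LeetCode/Python/Maximum XOR for Each Query.py | getMaximumXor
-- ===== SOURCE A (Python) =====
-- from typing import List
--
-- def getMaximumXor(nums: List[int], maximumBit: int) -> List[int]:
--     sums = [nums[0]]
--     xors = [int(f'{nums[0] ^ (2**20 - 1):020b}'[-maximumBit:], 2)]
--     for i in range(1,len(nums)):
--         xor = sums[-1] ^ nums[i]
--         sums.append(xor)
--         xors.append(int(f'{xor ^ (2**20 - 1):020b}'[-maximumBit:], 2))
--     return xors[::-1]
-- ===== SOURCE B (Python) =====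
-- from typing import List
--
-- def getMaximumXor(nums: List[int], maximumBit: int) -> List[int]:
--     run = 0
--     for x in nums:
--         run ^= x
--     ans = []
--     for x in reversed(nums):
--         ans.append(int(f'{run ^ (2**20 - 1):020b}'[-maximumBit:], 2))
--         run ^= x
--     return ans
-- ===== Notes on version B (the rewrite author's own statement) =====
-- stated objective: simpler
-- what changed: B drops A's stored forward prefix-XOR list (sums), the parallel xors list and the final [::-1]: it computes the total XOR once, then walks nums in reverse with a single running value, emitting each masked answer directly in final order.
-- outside the precondition, e.g. on getMaximumXor([1073741824], -20): A returns [2047], B returns [2047]; on getMaximumXor([3], -20): A raises ValueError, B raises ValueError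
import Mathlib
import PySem

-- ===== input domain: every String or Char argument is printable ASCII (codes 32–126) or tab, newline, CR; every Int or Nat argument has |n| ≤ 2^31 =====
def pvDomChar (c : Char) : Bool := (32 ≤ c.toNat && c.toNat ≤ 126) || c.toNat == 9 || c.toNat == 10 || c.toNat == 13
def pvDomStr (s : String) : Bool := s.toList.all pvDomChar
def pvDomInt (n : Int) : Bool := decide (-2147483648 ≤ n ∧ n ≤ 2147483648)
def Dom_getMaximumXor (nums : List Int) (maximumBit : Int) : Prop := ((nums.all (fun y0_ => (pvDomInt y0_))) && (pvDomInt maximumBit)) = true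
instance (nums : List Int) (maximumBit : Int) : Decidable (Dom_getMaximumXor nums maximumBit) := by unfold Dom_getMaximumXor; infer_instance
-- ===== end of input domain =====

-- B replaces A's stored forward prefix list + final [::-1] by one backward pass over a running
-- total XOR, emitting answers directly in final order (objective: simpler; same O(n) cost).


-- ===== PORT A =====
-- shared helper for the expression  int(f'{v ^ (2**20 - 1):020b}'[-maximumBit:], 2)
-- (identical text in Source A and Source B); exact on the slices these programs produce:
-- the sliced string is nonempty (guaranteed by Pre_) and is either all of '0'/'1'
-- or a '-' followed by at least one binary digit — exactly the strings int(·, 2) accepts.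

-- f'{v:b}' for v ≥ 0, most significant bit first (Python's binary digits of a Nat)
def pyBinNat (n : Nat) : List Char := Nat.toDigits 2 n

-- f'{v:020b}': zero-pad to total width 20; a negative v prints '-' then the padded digits
def pyBin020 (v : Int) : List Char :=
  if v < 0 then
    let d := pyBinNat v.natAbs
    '-' :: (List.replicate (19 - d.length) '0' ++ d)
  else
    let d := pyBinNat v.toNat
    List.replicate (20 - d.length) '0' ++ d

-- int(s, 2) on an optional '-' followed by binary digits; 0 on the empty string,
-- which Python rejects (ValueError) — such inputs are excluded by Pre_.
def pyParseBin : List Char → Int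
  | '-' :: rest => -(rest.foldl (fun a c => 2 * a + (if c = '1' then 1 else 0)) (0 : Int))
  | cs => cs.foldl (fun a c => 2 * a + (if c = '1' then 1 else 0)) (0 : Int)

-- int(f'{v ^ (2**20 - 1):020b}'[-maximumBit:], 2)
def pyMask20 (v : Int) (maximumBit : Int) : Int :=
  pyParseBin (PySem.List.slice (pyBin020 (PySem.Int.bxor v (2 ^ 20 - 1))) (some (-maximumBit)) none)

def getMaximumXor (nums : List Int) (maximumBit : Int) : List Int :=
  match nums with
  | [] => []  -- nums[0] raises IndexError; excluded by Pre_
  | n0 :: rest =>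
    -- sums = [nums[0]]; xors = [mask(nums[0])]; for i in range(1, len(nums)): … nums[i] …
    -- (the loop walks nums[1:], so it is folded over rest)
    let fin := rest.foldl
      (fun (st : List Int × List Int) x =>
        let xor := PySem.Int.bxor ((PySem.List.pyGet? st.1 (-1)).getD 0) x
        (st.1 ++ [xor], st.2 ++ [pyMask20 xor maximumBit]))
      ([n0], [pyMask20 n0 maximumBit])
    -- return xors[::-1]
    (PySem.List.slice? fin.2 none none (-1)).getD []

-- ===== PORT B =====
-- 'for x in reversed(nums): ans.append(mask(run)); run ^= x' as structural recursion
-- over the reversed list: each step emits one answer (cons, in iteration order) and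
-- threads run forward.
def altGo (mb : Int) (run : Int) : List Int → List Int
  | [] => []
  | x :: xs => pyMask20 run mb :: altGo mb (PySem.Int.bxor run x) xs

def getMaximumXor_alt (nums : List Int) (maximumBit : Int) : List Int :=
  -- run = total xor of nums
  let run := nums.foldl (fun a x => PySem.Int.bxor a x) 0
  altGo maximumBit run nums.reverse

-- ===== PRECONDITION & SPEC =====
-- Pre_ excludes empty nums (A raises IndexError) and maximumBit ≤ -20: there the slice of a
-- 20-character binary string is empty and A raises ValueError from int('', 2), except on the
-- data-dependent sliver where some prefix XOR prints more than 20 characters — whether A raises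
-- in that band depends on the values, so the whole band is excluded (B behaves like A there).
def Pre_getMaximumXor (nums : List Int) (maximumBit : Int) : Prop :=
  nums ≠ [] ∧ -20 < maximumBit
instance (nums : List Int) (maximumBit : Int) : Decidable (Pre_getMaximumXor nums maximumBit) := by
  unfold Pre_getMaximumXor; infer_instance

def pvWitness_getMaximumXor : List Int × Int := ([3, 1, 7], 2)

def Spec_getMaximumXor (nums : List Int) (maximumBit : Int) (out : List Int) : Prop := out = getMaximumXor_alt nums maximumBit
instance (nums : List Int) (maximumBit : Int) (out : List Int) : Decidable (Spec_getMaximumXor nums maximumBit out) := by unfold Spec_getMaximumXor; infer_instance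

-- ===== CLAIM (what is proved, stated in full; the proofs are below) =====
def Claim_equal_getMaximumXor : Prop := ∀ (nums : List Int) (maximumBit : Int), Dom_getMaximumXor nums maximumBit → Pre_getMaximumXor nums maximumBit → Spec_getMaximumXor nums maximumBit (getMaximumXor nums maximumBit)


-- ===== LEMMAS AND PROOFS =====

-- PySem.Int.bxor on the four Int constructor shapes, and xor-cancellation
theorem bxor_oo (m n : Nat) : PySem.Int.bxor (Int.ofNat m) (Int.ofNat n) = Int.ofNat (m ^^^ n) := by
  simp only [Int.ofNat_eq_natCast]
  unfold PySem.Int.bxor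
  rw [if_pos (Int.natCast_nonneg m), if_pos (Int.natCast_nonneg n)]
  simp

theorem bxor_on (m n : Nat) : PySem.Int.bxor (Int.ofNat m) (Int.negSucc n) = Int.negSucc (m ^^^ n) := by
  simp only [Int.ofNat_eq_natCast]
  unfold PySem.Int.bxor
  rw [if_pos (Int.natCast_nonneg m), if_neg (by simp [Int.negSucc_eq]; omega)]
  have h : (-(Int.negSucc n) - 1) = (n : Int) := by simp [Int.negSucc_eq]
  rw [h]
  simp [Int.negSucc_eq]; omega

theorem bxor_no (m n : Nat) : PySem.Int.bxor (Int.negSucc m) (Int.ofNat n) = Int.negSucc (m ^^^ n) := by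
  simp only [Int.ofNat_eq_natCast]
  unfold PySem.Int.bxor
  rw [if_neg (by simp [Int.negSucc_eq]; omega), if_pos (Int.natCast_nonneg n)]
  have h : (-(Int.negSucc m) - 1) = (m : Int) := by simp [Int.negSucc_eq]
  rw [h]
  simp [Int.negSucc_eq]; omega

theorem bxor_nn (m n : Nat) : PySem.Int.bxor (Int.negSucc m) (Int.negSucc n) = Int.ofNat (m ^^^ n) := by
  simp only [Int.ofNat_eq_natCast]
  unfold PySem.Int.bxor
  rw [if_neg (by simp [Int.negSucc_eq]; omega), if_neg (by simp [Int.negSucc_eq]; omega)]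
  have h1 : (-(Int.negSucc m) - 1) = (m : Int) := by simp [Int.negSucc_eq]
  have h2 : (-(Int.negSucc n) - 1) = (n : Int) := by simp [Int.negSucc_eq]
  rw [h1, h2]; simp

theorem bxor_cancel (a b : Int) : PySem.Int.bxor (PySem.Int.bxor a b) b = a := by
  rcases a with m | m <;> rcases b with n | n
  · rw [bxor_oo, bxor_oo, Nat.xor_xor_cancel_right]
  · rw [bxor_on, bxor_nn, Nat.xor_xor_cancel_right]
  · rw [bxor_no, bxor_no, Nat.xor_xor_cancel_right]
  · rw [bxor_nn, bxor_on, Nat.xor_xor_cancel_right]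

theorem zero_bxor (a : Int) : PySem.Int.bxor 0 a = a := by
  rw [PySem.Int.bxor_comm, PySem.Int.bxor_zero]

-- the running-xor prefix sums produced after start value a over l
def sumsList (a : Int) : List Int → List Int
  | [] => []
  | x :: xs => PySem.Int.bxor a x :: sumsList (PySem.Int.bxor a x) xs

-- the masked values appended for those prefix sums
def emList (mb a : Int) : List Int → List Int
  | [] => []
  | x :: xs => pyMask20 (PySem.Int.bxor a x) mb :: emList mb (PySem.Int.bxor a x) xs

theorem emList_append (mb a : Int) (l : List Int) (x : Int) :
    emList mb a (l ++ [x]) =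
      emList mb a l ++ [pyMask20 (PySem.Int.bxor (l.foldl (fun a x => PySem.Int.bxor a x) a) x) mb] := by
  induction l generalizing a with
  | nil => simp [emList]
  | cons y ys ih => simp [emList, ih]

-- characterisation of A's loop
theorem foldA_eq (mb : Int) (l : List Int) :
    ∀ (s : List Int) (a : Int) (xs : List Int),
    l.foldl
      (fun (st : List Int × List Int) x =>
        let xor := PySem.Int.bxor ((PySem.List.pyGet? st.1 (-1)).getD 0) x
        (st.1 ++ [xor], st.2 ++ [pyMask20 xor mb]))
      (s ++ [a], xs)
      = ((s ++ [a]) ++ sumsList a l, xs ++ emList mb a l) := by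
  induction l with
  | nil => intro s a xs; simp [sumsList, emList]
  | cons x t ih =>
    intro s a xs
    simp only [List.foldl_cons, PySem.List.pyGet?_neg_one_append_singleton, Option.getD_some]
    have := ih (s ++ [a]) (PySem.Int.bxor a x) (xs ++ [pyMask20 (PySem.Int.bxor a x) mb])
    simp only [this, sumsList, emList]
    simp

-- characterisation of B's backward pass: starting from the total XOR over l (seeded with a),
-- walking l.reverse emits exactly emList reversed
theorem altGo_eq (mb : Int) (l : List Int) :
    ∀ (a : Int),
    altGo mb (l.foldl (fun a x => PySem.Int.bxor a x) a) l.reverse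
      = (emList mb a l).reverse := by
  induction l using List.reverseRecOn with
  | nil => intro a; simp [altGo, emList]
  | append_singleton l x ih =>
    intro a
    simp only [List.reverse_append, List.reverse_cons, List.reverse_nil, List.nil_append,
      List.foldl_append, List.foldl_cons, List.foldl_nil, List.singleton_append, altGo]
    rw [bxor_cancel, ih a, emList_append]
    simp

theorem getMaximumXor_spec' (nums : List Int) (mb : Int) (h : nums ≠ []) :
    getMaximumXor nums mb = getMaximumXor_alt nums mb := by
  cases nums with
  | nil => exact absurd rfl h
  | cons n0 rest =>
    show (PySem.List.slice? (rest.foldl _ ([] ++ [n0], [pyMask20 n0 mb])).2 none none (-1)).getD [] = _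
    rw [foldA_eq mb rest [] n0 [pyMask20 n0 mb], PySem.List.slice?_none_none_neg_one]
    show _ = altGo mb ((n0 :: rest).foldl (fun a x => PySem.Int.bxor a x) 0) (n0 :: rest).reverse
    rw [altGo_eq mb (n0 :: rest) 0]
    simp [emList, zero_bxor]

-- ===== VERDICT (by name: the statement is the Claim_ definition above) =====
theorem getMaximumXor_spec : Claim_equal_getMaximumXor := by
  intro nums mb _ hpre
  exact getMaximumXor_spec' nums mb hpre.1
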